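-- pv_equiv track=rewrite | github.com/redhog/InfiniteGlass | glass-action/glass_action/input2txt.py | filter_binding
-- ===== SOURCE A (Python) =====
-- COMPATIBLE_EVENTS = (("KeyPress", "KeyRelease"), ("ButtonPress", "ButtonRelease", "MotionNotify"))
--
-- EVENT_TYPES = [event for group in COMPATIBLE_EVENTS for event in group]
--
-- def filter_binding(binding):
--     group = None
--     for part in binding:
--         for item in part:
--             if item in EVENT_TYPES:
--                 if group is None:
--                     for g in COMPATIBLE_EVENTS:
--                         if item in g:
--                             group = g
--                 elif item not in group:
--                     return True
--     return False
-- ===== SOURCE B (Python) =====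
-- COMPATIBLE_EVENTS = (("KeyPress", "KeyRelease"), ("ButtonPress", "ButtonRelease", "MotionNotify"))
--
-- def filter_binding(binding):
--     items = set()
--     for part in binding:
--         items.update(part)
--     return sum(1 for g in COMPATIBLE_EVENTS if any(e in items for e in g)) > 1
-- ===== Notes on version B (the rewrite author's own statement) =====
-- stated objective: simpler
-- what changed: Replaces the stateful first-group tracking with early return by two separate passes: accumulate all items into one set, then count how many COMPATIBLE_EVENTS groups that set intersects and test count > 1.
import Mathlib
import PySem

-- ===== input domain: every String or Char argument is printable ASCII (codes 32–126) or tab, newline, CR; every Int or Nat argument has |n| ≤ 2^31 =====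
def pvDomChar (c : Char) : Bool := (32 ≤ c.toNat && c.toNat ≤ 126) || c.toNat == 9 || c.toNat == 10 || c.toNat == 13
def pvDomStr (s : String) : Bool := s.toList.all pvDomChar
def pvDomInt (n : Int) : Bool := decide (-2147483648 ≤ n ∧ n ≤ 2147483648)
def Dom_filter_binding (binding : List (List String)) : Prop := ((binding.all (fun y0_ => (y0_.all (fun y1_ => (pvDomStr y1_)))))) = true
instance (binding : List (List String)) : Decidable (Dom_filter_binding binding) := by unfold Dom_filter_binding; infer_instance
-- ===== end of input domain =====

-- B accumulates every item into one set first, then counts the intersecting groups — simpler, no early-exit state.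

-- ===== PORT A =====
def COMPATIBLE_EVENTS : List (List String) :=
  [["KeyPress", "KeyRelease"], ["ButtonPress", "ButtonRelease", "MotionNotify"]]

def EVENT_TYPES : List String := COMPATIBLE_EVENTS.flatMap (fun group => group)

-- inner 'for item in part' loop; Bool = early 'return True'
def fbPart (group : Option (List String)) : List String → Option (List String) × Bool
  | [] => (group, false)
  | item :: rest =>
    if item ∈ EVENT_TYPES then
      match group with
      | none =>
        fbPart (COMPATIBLE_EVENTS.foldl (fun acc g => if item ∈ g then some g else acc) none) rest
      | some g =>
        if item ∉ g then (some g, true) else fbPart (some g) rest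
    else fbPart group rest

-- outer 'for part in binding' loop
def fbBinding (group : Option (List String)) : List (List String) → Bool
  | [] => false
  | part :: rest =>
    match fbPart group part with
    | (_, true) => true
    | (g', false) => fbBinding g' rest

def filter_binding (binding : List (List String)) : Bool :=
  fbBinding none binding

-- ===== PORT B =====
def filter_binding_alt (binding : List (List String)) : Bool :=
  let items : PySem.Set String :=
    binding.foldl (fun s part => PySem.Set.update s part) PySem.Set.empty
  decide ((COMPATIBLE_EVENTS.foldl
      (fun c g => if g.any (fun e => PySem.Set.contains items e) then c + 1 else c) (0 : Int)) > 1)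

-- ===== PRECONDITION & SPEC =====
def Spec_filter_binding (binding : List (List String)) (out : Bool) : Prop := out = filter_binding_alt binding
instance (binding : List (List String)) (out : Bool) : Decidable (Spec_filter_binding binding out) := by unfold Spec_filter_binding; infer_instance

-- ===== CLAIM (what is proved, stated in full; the proofs are below) =====
def Claim_equal_filter_binding : Prop := ∀ (binding : List (List String)), Dom_filter_binding binding → Spec_filter_binding binding (filter_binding binding)

-- ===== LEMMAS AND PROOFS =====

def G1 : List String := ["KeyPress", "KeyRelease"]
def G2 : List String := ["ButtonPress", "ButtonRelease", "MotionNotify"]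

def hasG (g : List String) (bs : List (List String)) : Bool :=
  bs.any (fun part => part.any (fun i => decide (i ∈ g)))

theorem mem_event_types (i : String) :
    i ∈ EVENT_TYPES ↔ i ∈ G1 ∨ i ∈ G2 := by
  simp [EVENT_TYPES, COMPATIBLE_EVENTS, G1, G2]
  tauto

theorem disjoint_groups (i : String) (h1 : i ∈ G1) (h2 : i ∈ G2) : False := by
  simp [G1, G2] at h1 h2
  rcases h1 with rfl | rfl <;> simp_all

theorem fold_group_G1 (i : String) (h : i ∈ G1) :
    COMPATIBLE_EVENTS.foldl (fun acc g => if i ∈ g then some g else acc) none = some G1 := by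
  have h2 : i ∉ G2 := fun h2 => disjoint_groups i h h2
  simp only [COMPATIBLE_EVENTS, List.foldl]
  rw [if_neg (by simpa [G2] using h2), if_pos (by simpa [G1] using h)]
  rfl

theorem fold_group_G2 (i : String) (h : i ∈ G2) :
    COMPATIBLE_EVENTS.foldl (fun acc g => if i ∈ g then some g else acc) none = some G2 := by
  simp only [COMPATIBLE_EVENTS, List.foldl]
  rw [if_pos (by simpa [G2] using h)]
  rfl

theorem fbBinding_cons_false (g g' : Option (List String)) (part : List String)
    (rest : List (List String)) (h : fbPart g part = (g', false)) :
    fbBinding g (part :: rest) = fbBinding g' rest := by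
  rw [fbBinding, h]

theorem fbBinding_cons_true (g : Option (List String)) (part : List String)
    (rest : List (List String)) (h : (fbPart g part).2 = true) :
    fbBinding g (part :: rest) = true := by
  rcases hp : fbPart g part with ⟨g', fl⟩
  rw [hp] at h
  subst h
  rw [fbBinding, hp]

-- running the inner loop with a fixed group: stays in that group, flags iff the other group occurs
theorem fbPart_some (ga gb : List String) (hne : ∀ i, i ∈ ga → i ∈ gb → False)
    (hab : ∀ i, i ∈ EVENT_TYPES ↔ i ∈ ga ∨ i ∈ gb) (part : List String) :
    fbPart (some ga) part = (some ga, part.any (fun i => decide (i ∈ gb))) := by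
  induction part with
  | nil => simp [fbPart]
  | cons item rest ih =>
    by_cases he : item ∈ EVENT_TYPES
    · rcases (hab item).1 he with hA | hB
      · have hnb : item ∉ gb := fun hb => hne item hA hb
        simp [fbPart, he, hA, hnb, ih]
      · have hna : item ∉ ga := fun ha => hne item ha hB
        simp [fbPart, he, hna, hB]
    · have hA : item ∉ ga := fun ha => he ((hab item).2 (Or.inl ha))
      have hB : item ∉ gb := fun hb => he ((hab item).2 (Or.inr hb))
      simp [fbPart, he, hB, ih]

theorem fbPart_none_snd (part : List String) :
    (fbPart none part).2 =
      ((part.any fun i => decide (i ∈ G1)) && (part.any fun i => decide (i ∈ G2))) := by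
  induction part with
  | nil => simp [fbPart]
  | cons item rest ih =>
    by_cases he : item ∈ EVENT_TYPES
    · rcases (mem_event_types item).1 he with hA | hB
      · have hnb : item ∉ G2 := fun hb => disjoint_groups item hA hb
        rw [fbPart, if_pos he, fold_group_G1 item hA,
          fbPart_some G1 G2 disjoint_groups mem_event_types]
        simp [hA, hnb]
      · have hna : item ∉ G1 := fun ha => disjoint_groups item ha hB
        rw [fbPart, if_pos he, fold_group_G2 item hB,
          fbPart_some G2 G1 (fun i a b => disjoint_groups i b a)
            (fun i => (mem_event_types i).trans or_comm)]
        simp [hna, hB]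
    · have hA : item ∉ G1 := fun ha => he ((mem_event_types item).2 (Or.inl ha))
      have hB : item ∉ G2 := fun hb => he ((mem_event_types item).2 (Or.inr hb))
      rw [fbPart, if_neg he]
      simp only [List.any_cons, decide_eq_false hA, decide_eq_false hB, Bool.false_or]
      exact ih

theorem fbPart_none_no_flag (part : List String)
    (h : ((part.any fun i => decide (i ∈ G1)) && (part.any fun i => decide (i ∈ G2))) = false) :
    fbPart none part =
      (if part.any fun i => decide (i ∈ G1) then some G1
       else if part.any fun i => decide (i ∈ G2) then some G2 else none, false) := by
  induction part with
  | nil => simp [fbPart]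
  | cons item rest ih =>
    by_cases he : item ∈ EVENT_TYPES
    · rcases (mem_event_types item).1 he with hA | hB
      · have hnb : item ∉ G2 := fun hb => disjoint_groups item hA hb
        have h2 : (rest.any fun i => decide (i ∈ G2)) = false := by
          simp only [List.any_cons, decide_eq_true hA, decide_eq_false hnb,
            Bool.true_or, Bool.true_and, Bool.false_or] at h
          exact h
        rw [fbPart, if_pos he, fold_group_G1 item hA,
          fbPart_some G1 G2 disjoint_groups mem_event_types]
        simp [hA, h2]
      · have hna : item ∉ G1 := fun ha => disjoint_groups item ha hB
        have h1 : (rest.any fun i => decide (i ∈ G1)) = false := by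
          by_contra hc
          simp only [Bool.not_eq_false] at hc
          rw [List.any_cons, List.any_cons, decide_eq_false hna, decide_eq_true hB,
            Bool.false_or, Bool.true_or, hc] at h
          simp at h
        rw [fbPart, if_pos he, fold_group_G2 item hB,
          fbPart_some G2 G1 (fun i a b => disjoint_groups i b a)
            (fun i => (mem_event_types i).trans or_comm)]
        simp [hna, hB, h1]
    · have hA : item ∉ G1 := fun ha => he ((mem_event_types item).2 (Or.inl ha))
      have hB : item ∉ G2 := fun hb => he ((mem_event_types item).2 (Or.inr hb))
      rw [fbPart, if_neg he]
      simp only [List.any_cons, decide_eq_false hA, decide_eq_false hB, Bool.false_or] at h ⊢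
      exact ih h

theorem fbBinding_some (ga gb : List String) (hne : ∀ i, i ∈ ga → i ∈ gb → False)
    (hab : ∀ i, i ∈ EVENT_TYPES ↔ i ∈ ga ∨ i ∈ gb) (bs : List (List String)) :
    fbBinding (some ga) bs = hasG gb bs := by
  induction bs with
  | nil => simp [fbBinding, hasG]
  | cons part rest ih =>
    by_cases h : (part.any fun i => decide (i ∈ gb)) = true
    · rw [fbBinding_cons_true _ part rest (by rw [fbPart_some ga gb hne hab part]; exact h)]
      simp [hasG, h]
    · simp only [Bool.not_eq_true] at h
      rw [fbBinding_cons_false _ _ part rest (by rw [fbPart_some ga gb hne hab part, h]), ih]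
      simp [hasG, h]

theorem fbBinding_none (bs : List (List String)) :
    fbBinding none bs = (hasG G1 bs && hasG G2 bs) := by
  induction bs with
  | nil => simp [fbBinding, hasG]
  | cons part rest ih =>
    by_cases hflag : ((part.any fun i => decide (i ∈ G1)) && (part.any fun i => decide (i ∈ G2))) = true
    · rw [fbBinding_cons_true _ part rest (by rw [fbPart_none_snd]; exact hflag)]
      rcases Bool.and_eq_true_iff.mp hflag with ⟨ha, hb⟩
      simp [hasG, ha, hb]
    · simp only [Bool.not_eq_true] at hflag
      rw [fbBinding_cons_false _ _ part rest (fbPart_none_no_flag part hflag)]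
      by_cases h1 : (part.any fun i => decide (i ∈ G1)) = true
      · have h2 : (part.any fun i => decide (i ∈ G2)) = false := by
          rw [h1] at hflag; simpa using hflag
        rw [if_pos h1, fbBinding_some G1 G2 disjoint_groups mem_event_types]
        simp [hasG, h1, h2]
      · simp only [Bool.not_eq_true] at h1
        by_cases h2 : (part.any fun i => decide (i ∈ G2)) = true
        · rw [if_neg (by simp [h1]), if_pos h2,
            fbBinding_some G2 G1 (fun i a b => disjoint_groups i b a)
              (fun i => (mem_event_types i).trans or_comm)]
          simp [hasG, h1, h2]
        · simp only [Bool.not_eq_true] at h2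
          rw [if_neg (by simp [h1]), if_neg (by simp [h2]), ih]
          simp [hasG, h1, h2]

-- B side: membership in the accumulated set
theorem mem_items (bs : List (List String)) (s : PySem.Set String) (e : String) :
    e ∈ bs.foldl (fun s part => PySem.Set.update s part) s ↔
      e ∈ s ∨ ∃ part ∈ bs, e ∈ part := by
  induction bs generalizing s with
  | nil => simp
  | cons part rest ih =>
    simp only [List.foldl_cons, ih, PySem.Set.mem_update, List.mem_cons]
    constructor
    · rintro (⟨h | h⟩ | ⟨p, hp, hep⟩)
      · exact Or.inl h
      · exact Or.inr ⟨part, Or.inl rfl, h⟩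
      · exact Or.inr ⟨p, Or.inr hp, hep⟩
    · rintro (h | ⟨p, rfl | hp, hep⟩)
      · exact Or.inl (Or.inl h)
      · exact Or.inl (Or.inr hep)
      · exact Or.inr ⟨p, hp, hep⟩

theorem alt_eq_hasG (bs : List (List String)) :
    filter_binding_alt bs = (hasG G1 bs && hasG G2 bs) := by
  unfold filter_binding_alt
  have key : ∀ g : List String,
      (g.any fun e => PySem.Set.contains
        (bs.foldl (fun s part => PySem.Set.update s part) PySem.Set.empty) e) = hasG g bs := by
    intro g
    rw [Bool.eq_iff_iff]
    simp only [hasG, List.any_eq_true, PySem.Set.contains_iff, mem_items, PySem.Set.empty,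
      List.not_mem_nil, false_or, decide_eq_true_eq]
    constructor
    · rintro ⟨e, he, p, hp, hep⟩; exact ⟨p, hp, e, hep, he⟩
    · rintro ⟨p, hp, e, hep, he⟩; exact ⟨e, he, p, hp, hep⟩
  have hce : COMPATIBLE_EVENTS = [G1, G2] := rfl
  simp only [hce, List.foldl_cons, List.foldl_nil, key]
  by_cases h1 : hasG G1 bs = true <;> by_cases h2 : hasG G2 bs = true <;>
    simp [h1, h2]

-- ===== VERDICT (by name: the statement is the Claim_ definition above) =====
theorem filter_binding_spec : Claim_equal_filter_binding := by
  intro bs _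
  unfold Spec_filter_binding filter_binding
  rw [fbBinding_none, alt_eq_hasG]
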